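-- pv_equiv track=rewrite | github.com/U2301/kodem-discord-bot | generar_json.py | find_expansion_positions
-- ===== SOURCE A (Python) =====
-- from typing import List, Dict, Tuple
--
-- EXPANSION_HEADERS = {
--     'RAICES MISTICAS': 'Raíces Místicas',
--     'LA GUERRA ROJA': 'La Guerra Roja',
--     'TITANES DE LA CORTEZA Y OJOS DEL OCEANO': 'Titanes de la Corteza y Ojos del Océano',
-- }
--
-- def find_expansion_positions(s: str) -> List[Tuple[int, str]]:
--     # Devuelve [(posicion_en_texto, nombre_normalizado)]
--     out = []
--     upper = s.upper()
--     for raw, norm in EXPANSION_HEADERS.items():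
--         start = 0
--         while True:
--             idx = upper.find(raw, start)
--             if idx == -1:
--                 break
--             out.append((idx, norm))
--             start = idx + 1
--     out.sort(key=lambda x: x[0])
--     return out
-- ===== SOURCE B (Python) =====
-- from typing import List, Tuple
--
-- EXPANSION_HEADERS = {
--     'RAICES MISTICAS': 'Raíces Místicas',
--     'LA GUERRA ROJA': 'La Guerra Roja',
--     'TITANES DE LA CORTEZA Y OJOS DEL OCEANO': 'Titanes de la Corteza y Ojos del Océano',
-- }
--
-- def find_expansion_positions(s: str) -> List[Tuple[int, str]]:
--     # One left-to-right scan over positions; output is already in ascending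
--     # order, so no final sort is needed.
--     upper = s.upper()
--     out = []
--     for i in range(len(upper)):
--         for raw, norm in EXPANSION_HEADERS.items():
--             if upper.startswith(raw, i):
--                 out.append((i, norm))
--     return out
-- ===== Notes on version B (the rewrite author's own statement) =====
-- stated objective: alternative
-- what changed: Replaces the per-pattern repeated str.find scans followed by a final sort with a single left-to-right scan over text positions that tests each header prefix at every index, emitting results already in ascending order so no sort is needed.
import Mathlib
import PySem

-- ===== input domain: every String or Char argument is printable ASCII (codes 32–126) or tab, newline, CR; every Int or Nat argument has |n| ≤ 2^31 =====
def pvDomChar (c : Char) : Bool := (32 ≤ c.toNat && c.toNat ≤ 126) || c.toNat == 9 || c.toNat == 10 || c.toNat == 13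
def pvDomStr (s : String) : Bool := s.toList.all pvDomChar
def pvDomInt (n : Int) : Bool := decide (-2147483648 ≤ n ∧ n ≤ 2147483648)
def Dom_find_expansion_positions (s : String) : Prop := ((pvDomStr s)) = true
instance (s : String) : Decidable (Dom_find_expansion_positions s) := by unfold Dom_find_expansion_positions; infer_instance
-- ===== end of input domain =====

-- B replaces A's per-pattern repeated str.find scans plus a final sort by one
-- left-to-right scan over text positions testing each header prefix at every
-- index, so results come out already sorted (objective: alternative algorithm).

-- the module constant EXPANSION_HEADERS (a dict, iterated in insertion order)
def pvHeaders : List (List Char × String) :=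
  [("RAICES MISTICAS".toList, "Raíces Místicas"),
   ("LA GUERRA ROJA".toList, "La Guerra Roja"),
   ("TITANES DE LA CORTEZA Y OJOS DEL OCEANO".toList, "Titanes de la Corteza y Ojos del Océano")]

-- ===== PORT A =====
-- termination fact for A's while loop: a successful find is at or after the start
lemma pv_findFrom_ge (u raw : List Char) (start : Nat)
    (h : PySem.Chars.findFrom u raw (start : Int) none ≠ -1) :
    (start : Int) ≤ PySem.Chars.findFrom u raw (start : Int) none ∧ start ≤ u.length := by
  by_cases hs : start ≤ u.length
  · exact ⟨(PySem.Chars.findFrom_natCast_spec u raw start hs h).1, hs⟩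
  · exfalso; apply h
    unfold PySem.Chars.findFrom
    split_ifs <;> simp_all <;> omega

-- the 'while True: idx = upper.find(raw, start); if idx == -1: break; out.append((idx, norm)); start = idx + 1' loop
def pvFindLoop (upper raw : List Char) (norm : String) (start : Nat)
    (out : List (Int × String)) : List (Int × String) :=
  let idx := PySem.Chars.findFrom upper raw (start : Int) none
  if h : idx = -1 then out
  else pvFindLoop upper raw norm (idx.toNat + 1) (out ++ [(idx, norm)])
termination_by upper.length + 1 - start
decreasing_by
  have := pv_findFrom_ge upper raw start h
  omega

def find_expansion_positions (s : String) : List (Int × String) :=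
  let upper := PySem.Chars.upper s.toList
  let out := pvHeaders.foldl (fun out rn => pvFindLoop upper rn.1 rn.2 0 out)
               ([] : List (Int × String))
  PySem.List.sorted out (fun x => x.1)

-- ===== PORT B =====
-- 'for i in range(len(upper)): for raw, norm in EXPANSION_HEADERS.items(): if upper.startswith(raw, i): out.append((i, norm))'
-- (Python's upper.startswith(raw, i) with 0 ≤ i ≤ len(upper) is exactly startswith on the drop at i)
def find_expansion_positions_alt (s : String) : List (Int × String) :=
  let upper := PySem.Chars.upper s.toList
  (List.range upper.length).foldl
    (fun out i =>
      pvHeaders.foldl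
        (fun out rn =>
          if PySem.Chars.startswith (upper.drop i) rn.1 then out ++ [((i : Int), rn.2)] else out)
        out)
    []

-- ===== PRECONDITION & SPEC =====
def Spec_find_expansion_positions (s : String) (out : List (Int × String)) : Prop := out = find_expansion_positions_alt s
instance (s : String) (out : List (Int × String)) : Decidable (Spec_find_expansion_positions s out) := by unfold Spec_find_expansion_positions; infer_instance

-- ===== CLAIM (what is proved, stated in full; the proofs are below) =====
def Claim_equal_find_expansion_positions : Prop := ∀ (s : String), Dom_find_expansion_positions s → Spec_find_expansion_positions s (find_expansion_positions s)

-- ===== LEMMAS AND PROOFS =====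

-- the first header (if any) matching at position i, paired with that position
def pvMatch? (u : List Char) (i : Nat) : Option (Int × String) :=
  (pvHeaders.find? (fun rn => PySem.Chars.startswith (u.drop i) rn.1)).map
    (fun rn => ((i : Int), rn.2))

-- canonical result: positions scanned left to right
def pvCanon (u : List Char) : List (Int × String) :=
  (List.range u.length).filterMap (pvMatch? u)

-- one header's contribution at one position
def pvOpt (u : List Char) (rn : List Char × String) (i : Nat) : Option (Int × String) :=
  if PySem.Chars.startswith (u.drop i) rn.1 then some ((i : Int), rn.2) else none

lemma pv_sw_head (t p : List Char) (h : PySem.Chars.startswith t p = true)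
    (c : Char) (hc : p.head? = some c) : t.head? = some c := by
  rcases (PySem.Chars.startswith_iff t p).mp h with ⟨r, hr⟩
  subst hr
  cases p <;> simp_all

-- at most one header matches at a position (their first letters differ), so the
-- first match is the concatenation of all three optional contributions
lemma pv_match_toList (u : List Char) (i : Nat) :
    (pvMatch? u i).toList
      = pvHeaders.flatMap (fun rn => (pvOpt u rn i).toList) := by
  simp only [pvHeaders, pvMatch?, pvOpt, List.find?, List.flatMap]
  cases hb1 : PySem.Chars.startswith (u.drop i) "RAICES MISTICAS".toList <;>
  cases hb2 : PySem.Chars.startswith (u.drop i) "LA GUERRA ROJA".toList <;>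
  cases hb3 : PySem.Chars.startswith (u.drop i) "TITANES DE LA CORTEZA Y OJOS DEL OCEANO".toList <;>
    simp_all
  · have h2 := pv_sw_head _ _ hb2 'L' (by decide)
    have h3 := pv_sw_head _ _ hb3 'T' (by decide)
    simp_all
  · have h1 := pv_sw_head _ _ hb1 'R' (by decide)
    have h3 := pv_sw_head _ _ hb3 'T' (by decide)
    simp_all
  · have h1 := pv_sw_head _ _ hb1 'R' (by decide)
    have h2 := pv_sw_head _ _ hb2 'L' (by decide)
    simp_all
  · have h1 := pv_sw_head _ _ hb1 'R' (by decide)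
    have h2 := pv_sw_head _ _ hb2 'L' (by decide)
    simp_all

-- at most one header matches at a position, so the inner loop over headers
-- appends exactly the first match
lemma pv_inner (u : List Char) (i : Nat) (out : List (Int × String)) :
    pvHeaders.foldl
      (fun out rn =>
        if PySem.Chars.startswith (u.drop i) rn.1 then out ++ [((i : Int), rn.2)] else out)
      out
    = out ++ (pvMatch? u i).toList := by
  simp only [pvHeaders, pvMatch?, List.foldl, List.find?]
  cases hb1 : PySem.Chars.startswith (u.drop i) "RAICES MISTICAS".toList <;>
  cases hb2 : PySem.Chars.startswith (u.drop i) "LA GUERRA ROJA".toList <;>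
  cases hb3 : PySem.Chars.startswith (u.drop i) "TITANES DE LA CORTEZA Y OJOS DEL OCEANO".toList <;>
    simp_all
  · have h2 := pv_sw_head _ _ hb2 'L' (by decide)
    have h3 := pv_sw_head _ _ hb3 'T' (by decide)
    simp_all
  · have h1 := pv_sw_head _ _ hb1 'R' (by decide)
    have h3 := pv_sw_head _ _ hb3 'T' (by decide)
    simp_all
  · have h1 := pv_sw_head _ _ hb1 'R' (by decide)
    have h2 := pv_sw_head _ _ hb2 'L' (by decide)
    simp_all
  · have h1 := pv_sw_head _ _ hb1 'R' (by decide)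
    have h2 := pv_sw_head _ _ hb2 'L' (by decide)
    simp_all

-- B computes pvCanon: positions left to right, first match at each position
lemma pv_alt_eq_canon (s : String) :
    find_expansion_positions_alt s = pvCanon (PySem.Chars.upper s.toList) := by
  simp only [find_expansion_positions_alt, pvCanon]
  rw [PySem.List.foldl_congr_mem _ _
        (fun out i => out ++ (pvMatch? (PySem.Chars.upper s.toList) i).toList) _
        (fun acc i _ => pv_inner _ i acc)]
  rw [PySem.List.foldl_append_eq_flatMap, List.filterMap_eq_flatMap_toList]
  simp

-- splitting a filtered range at its first hit at or after a
lemma pv_filter_split (n m a : Nat) (P : Nat → Bool) (ham : a ≤ m) (hmn : m < n)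
    (hPm : P m = true) (hmin : ∀ i, a ≤ i → i < m → P i = false) :
    (List.range n).filter (fun i => decide (a ≤ i) && P i)
      = m :: (List.range n).filter (fun i => decide (m + 1 ≤ i) && P i) := by
  induction n with
  | zero => exact absurd hmn (Nat.not_lt_zero m)
  | succ n ihn =>
    rw [List.range_succ, List.filter_append, List.filter_append]
    by_cases hnm : m = n
    · subst hnm
      have h1 : (List.range m).filter (fun i => decide (a ≤ i) && P i) = [] := by
        apply List.filter_eq_nil_iff.mpr
        intro i hi
        simp only [List.mem_range] at hi
        by_cases hai : a ≤ i
        · simp [hmin i hai hi]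
        · simp [hai]
      have h2 : (List.range m).filter (fun i => decide (m + 1 ≤ i) && P i) = [] := by
        apply List.filter_eq_nil_iff.mpr
        intro i hi
        simp only [List.mem_range] at hi
        have hni : ¬ (m + 1 ≤ i) := by omega
        simp [hni]
      rw [h1, h2]
      simp [hPm, ham]
    · have hmn' : m < n := by omega
      rw [ihn hmn']
      have h3 : a ≤ n := by omega
      have h4 : m < n := by omega
      by_cases hP : P n <;> simp [h3, h4, hP]

-- A's while loop collects, in ascending order, every position ≥ start where raw matches
lemma pv_loop_spec (u raw : List Char) (hraw : raw ≠ []) (norm : String) :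
    ∀ (start : Nat) (out : List (Int × String)),
      pvFindLoop u raw norm start out
        = out ++ ((List.range u.length).filter
            (fun i => decide (start ≤ i) && PySem.Chars.startswith (u.drop i) raw)).map
            (fun i : Nat => ((i : Int), norm)) := by
  suffices h : ∀ (fuel start : Nat) (out : List (Int × String)),
      u.length + 1 - start ≤ fuel →
      pvFindLoop u raw norm start out
        = out ++ ((List.range u.length).filter
            (fun i => decide (start ≤ i) && PySem.Chars.startswith (u.drop i) raw)).map
            (fun i : Nat => ((i : Int), norm)) by
    intro start out
    exact h (u.length + 1 - start) start out le_rfl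
  intro fuel
  induction fuel with
  | zero =>
    intro start out hle
    have hs : u.length < start := by omega
    rw [pvFindLoop]
    have hidx : PySem.Chars.findFrom u raw (start : Int) none = -1 := by
      by_contra hc
      have := pv_findFrom_ge u raw start hc
      omega
    rw [dif_pos hidx]
    have hf : (List.range u.length).filter
        (fun i => decide (start ≤ i) && PySem.Chars.startswith (u.drop i) raw) = [] := by
      apply List.filter_eq_nil_iff.mpr
      intro i hi
      simp only [List.mem_range] at hi
      have hni : ¬ (start ≤ i) := by omega
      simp [hni]
    rw [hf]
    simp
  | succ fuel ih =>
    intro start out hle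
    rw [pvFindLoop]
    by_cases hidx : PySem.Chars.findFrom u raw (start : Int) none = -1
    · rw [dif_pos hidx]
      have hf : (List.range u.length).filter
          (fun i => decide (start ≤ i) && PySem.Chars.startswith (u.drop i) raw) = [] := by
        apply List.filter_eq_nil_iff.mpr
        intro i hi
        simp only [List.mem_range] at hi
        by_cases hsi : start ≤ i
        · by_cases hs2 : start ≤ u.length
          · have hno := (PySem.Chars.findFrom_natCast_eq_neg_one_iff u raw start hs2).mp hidx
            have hsw : PySem.Chars.startswith (u.drop i) raw = false := by
              apply Bool.eq_false_iff.mpr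
              intro hsw
              apply hno
              have hpref := (PySem.Chars.startswith_iff _ _).mp hsw
              have hdd : u.drop i = (u.drop start).drop (i - start) := by
                rw [List.drop_drop]
                congr 1
                omega
              rw [hdd] at hpref
              exact hpref.isInfix.trans (List.drop_suffix _ _).isInfix
            simp [hsw]
          · omega
        · simp [hsi]
      rw [hf]
      simp
    · rw [dif_neg hidx]
      have hge := pv_findFrom_ge u raw start hidx
      obtain ⟨h1, h2, h3⟩ := PySem.Chars.findFrom_natCast_spec u raw start hge.2 hidx
      set idx := PySem.Chars.findFrom u raw (start : Int) none with hidxdef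
      have h0 : (0 : Int) ≤ idx := le_trans (Int.natCast_nonneg start) h1
      have hm : idx = ((idx.toNat : Nat) : Int) := (Int.toNat_of_nonneg h0).symm
      have hlt : idx.toNat < u.length := by
        rcases h2 with ⟨t, ht⟩
        have hlen : u.length - idx.toNat = raw.length + t.length := by
          rw [show raw.length + t.length = (raw ++ t).length by simp, ht]
          simp
        have hrl : 0 < raw.length := List.length_pos_iff.mpr hraw
        omega
      have hstart_le : start ≤ idx.toNat := by omega
      rw [ih (idx.toNat + 1) (out ++ [(idx, norm)]) (by omega)]
      rw [pv_filter_split u.length idx.toNat start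
            (fun i => PySem.Chars.startswith (u.drop i) raw) hstart_le hlt
            ((PySem.Chars.startswith_iff _ _).mpr h2)
            (fun i hai him => Bool.eq_false_iff.mpr
              (fun hsw => h3 i hai him ((PySem.Chars.startswith_iff _ _).mp hsw)))]
      simp only [List.map_cons]
      rw [hm]
      simp

-- (l.filter p).map f written as a filterMap
lemma pv_filter_map {α β : Type} (l : List α) (p : α → Bool) (f : α → β) :
    (l.filter p).map f = l.filterMap (fun a => if p a then some (f a) else none) := by
  induction l with
  | nil => rfl
  | cons a l ih => by_cases h : p a <;> simp [h, ih]

-- transposing a double flatMap is a permutation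
lemma pv_flatMap_comm {α β γ : Type} (l1 : List α) (l2 : List β) (f : α → β → List γ) :
    (l1.flatMap fun a => l2.flatMap (f a)).Perm
      (l2.flatMap fun b => l1.flatMap fun a => f a b) := by
  induction l1 with
  | nil => simp
  | cons a l1 ih =>
    simp only [List.flatMap_cons]
    refine ((ih.append_left (l2.flatMap (f a))).trans ?_)
    exact List.flatMap_append_perm l2 (f a) _

-- A's fold over the headers, rewritten with the loop characterisation
lemma pv_A_out (u : List Char) :
    pvHeaders.foldl (fun out rn => pvFindLoop u rn.1 rn.2 0 out) []
      = pvHeaders.flatMap (fun rn => (List.range u.length).filterMap (pvOpt u rn)) := by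
  have hne : ∀ rn ∈ pvHeaders, rn.1 ≠ [] := by decide
  rw [PySem.List.foldl_congr_mem _ _
        (fun out rn => out ++ (List.range u.length).filterMap (pvOpt u rn)) _
        (fun acc rn hrn => by
          show _ = acc ++ (List.range u.length).filterMap (pvOpt u rn)
          rw [pv_loop_spec u rn.1 (hne rn hrn) rn.2 0 acc, pv_filter_map]
          congr 1)]
  rw [PySem.List.foldl_append_eq_flatMap]
  simp

lemma pv_perm (u : List Char) :
    (pvCanon u).Perm (pvHeaders.flatMap fun rn => (List.range u.length).filterMap (pvOpt u rn)) := by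
  have h1 : pvCanon u
      = (List.range u.length).flatMap (fun i => pvHeaders.flatMap (fun rn => (pvOpt u rn i).toList)) := by
    unfold pvCanon
    rw [List.filterMap_eq_flatMap_toList]
    simp only [pv_match_toList]
  rw [h1]
  refine (pv_flatMap_comm (List.range u.length) pvHeaders (fun i rn => (pvOpt u rn i).toList)).trans ?_
  have h2 : (pvHeaders.flatMap fun rn => (List.range u.length).flatMap fun i => (pvOpt u rn i).toList)
      = pvHeaders.flatMap fun rn => (List.range u.length).filterMap (pvOpt u rn) := by
    simp only [List.filterMap_eq_flatMap_toList]
  rw [h2]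

lemma pv_match_fst (u : List Char) (i : Nat) (b : Int × String)
    (h : pvMatch? u i = some b) : b.1 = (i : Int) := by
  unfold pvMatch? at h
  rcases Option.map_eq_some_iff.mp h with ⟨rn, _, hb⟩
  rw [← hb]

lemma pv_pairwise (u : List Char) : (pvCanon u).Pairwise (fun a b => a.1 < b.1) := by
  unfold pvCanon
  rw [List.pairwise_filterMap]
  refine List.Pairwise.imp ?_ List.pairwise_lt_range
  intro i j hij b hb b' hb'
  rw [pv_match_fst u i b hb, pv_match_fst u j b' hb']
  exact_mod_cast hij

-- ===== VERDICT (by name: the statement is the Claim_ definition above) =====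
theorem find_expansion_positions_spec : Claim_equal_find_expansion_positions := by
  intro s _
  unfold Spec_find_expansion_positions
  rw [pv_alt_eq_canon]
  simp only [find_expansion_positions]
  rw [pv_A_out]
  exact PySem.List.sorted_eq_of_perm_of_pairwise_lt _ _ _
    (pv_perm (PySem.Chars.upper s.toList)) (pv_pairwise (PySem.Chars.upper s.toList))
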